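-- pv_equiv track=rewrite | github.com/dionsaputra/Crossword-Puzzle-Solver | tucil1_6.py | get_all_block
-- ===== SOURCE A (Python) =====
-- def get_all_block(tts):
--     ret = []
--     # horizontal
--     for i in range(len(tts)):
--         j = 0
--         while j < len(tts):
--             if tts[i][j] != "#":
--                 head = [i, j]
--                 k = 0
--                 while j + k < len(tts) and tts[i][j + k] != "#":
--                     k += 1
--                 if k > 1:
--                     ret.append((head, k, True))
--                 j += k
--             else:
--                 j += 1
--     # vertical
--     for j in range(len(tts)):
--         i = 0
--         while i < len(tts):
--             if tts[i][j] != "#":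
--                 head = [i, j]
--                 k = 0
--                 while i + k < len(tts) and tts[i + k][j] != "#":
--                     k += 1
--                 if k > 1:
--                     ret.append([head, k, False])
--                 i += k
--             else:
--                 i += 1
--     return ret
-- ===== SOURCE B (Python) =====
-- def get_all_block(tts):
--     # Detect word slots by splitting each line on '#' instead of index-skipping.
--     n = len(tts)
--
--     def runs(s):
--         out = []
--         pos = 0
--         for part in s.split('#'):
--             if len(part) > 1:
--                 out.append((pos, len(part)))
--             pos += len(part) + 1
--         return out
--
--     ret = []
--     for i in range(n):
--         for j, k in runs(tts[i][:n]):
--             ret.append(([i, j], k, True))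
--     for j in range(n):
--         col = ''.join(tts[i][j] for i in range(n))
--         for i, k in runs(col):
--             ret.append([[i, j], k, False])
--     return ret
-- ===== Notes on version B (the rewrite author's own statement) =====
-- stated objective: idiomatic
-- what changed: B replaces A's nested index-skipping while loops with a split-on-'#' pass per row and per column (a shared runs() helper over str.split), building columns once with join; Pre_ only excludes inputs where A raises IndexError (some row shorter than len(tts)).
import Mathlib
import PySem

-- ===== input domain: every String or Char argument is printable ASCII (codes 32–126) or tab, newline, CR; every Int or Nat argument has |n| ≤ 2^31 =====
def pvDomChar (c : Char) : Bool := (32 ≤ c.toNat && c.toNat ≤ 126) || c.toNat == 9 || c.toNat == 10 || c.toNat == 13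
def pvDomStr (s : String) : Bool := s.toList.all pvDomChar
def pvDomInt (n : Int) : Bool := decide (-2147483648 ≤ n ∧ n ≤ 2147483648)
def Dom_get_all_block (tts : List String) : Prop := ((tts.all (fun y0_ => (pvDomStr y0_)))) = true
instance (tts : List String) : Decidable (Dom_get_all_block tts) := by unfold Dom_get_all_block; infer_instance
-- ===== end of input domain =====

-- B finds the word slots of each line by splitting on '#' (one pass per row/column)
-- instead of A's index-skipping while loops; objective: idiomatic, same cost.

-- ===== PORT A =====
-- tts[i][j]; the '#' default is never reached under Pre_ (every access is in range there)
def pvCell (tts : List String) (i j : Nat) : Char := ((tts.getD i "").toList).getD j '#'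

-- inner while:  k = 0; while pos+k < n and f(pos+k) != '#': k += 1   (fuel = n - pos suffices)
def pvRunLen (f : Nat → Char) (n pos fuel : Nat) : Nat :=
  match fuel with
  | 0 => 0
  | fuel+1 => if pos < n ∧ f pos ≠ '#' then pvRunLen f n (pos+1) fuel + 1 else 0

-- outer while over one line (row or column), collecting (head-offset, k) pairs; fuel = n
def pvScan (f : Nat → Char) (n pos fuel : Nat) (acc : List (Nat × Nat)) : List (Nat × Nat) :=
  match fuel with
  | 0 => acc
  | fuel+1 =>
    if pos < n then
      if f pos ≠ '#' then
        let k := pvRunLen f n pos (n - pos)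
        pvScan f n (pos + k) fuel (if 1 < k then acc ++ [(pos, k)] else acc)
      else pvScan f n (pos + 1) fuel acc
    else acc

def get_all_block (tts : List String) : List (List Int × Int × Bool) :=
  let n := tts.length
  let h := (List.range n).foldl (fun acc i =>
    acc ++ (pvScan (fun j => pvCell tts i j) n 0 n []).map
      (fun p => ([(i : Int), (p.1 : Int)], (p.2 : Int), true))) []
  (List.range n).foldl (fun acc j =>
    acc ++ (pvScan (fun i => pvCell tts i j) n 0 n []).map
      (fun p => ([(p.1 : Int), (j : Int)], (p.2 : Int), false))) h

-- ===== PORT B =====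
-- exact port of Python's s.split('#') (single-character separator, keeps empty parts)
def pvSplitHash (l : List Char) : List (List Char) :=
  match l with
  | [] => [[]]
  | c :: rest =>
    if c = '#' then [] :: pvSplitHash rest
    else
      match pvSplitHash rest with
      | [] => [[c]]
      | p :: ps => (c :: p) :: ps

-- Source B's runs(): fold over the split parts, tracking the running start position
def pvRuns (l : List Char) : List (Nat × Nat) :=
  ((pvSplitHash l).foldl
    (fun st part =>
      (if 1 < part.length then st.1 ++ [(st.2, part.length)] else st.1,
       st.2 + part.length + 1))
    (([] : List (Nat × Nat)), 0)).1

def get_all_block_alt (tts : List String) : List (List Int × Int × Bool) :=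
  let n := tts.length
  let h := (List.range n).flatMap (fun i =>
    (pvRuns ((tts.getD i "").toList.take n)).map
      (fun p => ([(i : Int), (p.1 : Int)], (p.2 : Int), true)))
  let v := (List.range n).flatMap (fun j =>
    (pvRuns ((List.range n).map (fun i => pvCell tts i j))).map
      (fun p => ([(p.1 : Int), (j : Int)], (p.2 : Int), false)))
  h ++ v

-- ===== PRECONDITION & SPEC =====
-- A indexes every row at every column < len(tts); it raises IndexError iff some row is shorter.
def Pre_get_all_block (tts : List String) : Prop := ∀ s ∈ tts, tts.length ≤ s.length
instance (tts : List String) : Decidable (Pre_get_all_block tts) := by unfold Pre_get_all_block; infer_instance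

def pvWitness_get_all_block : List String := ["ab", "a#"]

def Spec_get_all_block (tts : List String) (out : List (List Int × Int × Bool)) : Prop := out = get_all_block_alt tts
instance (tts : List String) (out : List (List Int × Int × Bool)) : Decidable (Spec_get_all_block tts out) := by unfold Spec_get_all_block; infer_instance

-- ===== CLAIM (what is proved, stated in full; the proofs are below) =====
def Claim_equal_get_all_block : Prop := ∀ (tts : List String), Dom_get_all_block tts → Pre_get_all_block tts → Spec_get_all_block tts (get_all_block tts)

-- ===== LEMMAS AND PROOFS =====

-- common specification: maximal runs of non-'#' chars of length > 1, with absolute offsets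
def pvBlocksOff (l : List Char) (off : Nat) : List (Nat × Nat) :=
  match l with
  | [] => []
  | c :: rest =>
    if c = '#' then pvBlocksOff rest (off + 1)
    else
      let t := (c :: rest).takeWhile (· ≠ '#')
      (if 1 < t.length then [(off, t.length)] else []) ++
        pvBlocksOff ((c :: rest).dropWhile (· ≠ '#')) (off + t.length)
termination_by l.length
decreasing_by
  · simp
  · simp_all [List.dropWhile]
    exact List.length_dropWhile_le _ _

theorem pvRunLen_eq (l : List Char) (f : Nat → Char)
    (hf : ∀ p, p < l.length → f p = l.getD p '#') :
    ∀ fuel pos, l.length ≤ fuel + pos →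
      pvRunLen f l.length pos fuel = ((l.drop pos).takeWhile (· ≠ '#')).length := by
  intro fuel
  induction fuel with
  | zero =>
    intro pos h
    have hle : l.length ≤ pos := by omega
    simp [pvRunLen, List.drop_eq_nil_of_le hle]
  | succ fl ih =>
    intro pos h
    by_cases hp : pos < l.length
    · have hdrop : l.drop pos = l[pos] :: l.drop (pos + 1) := List.drop_eq_getElem_cons hp
      have hfd : f pos = l[pos] := by
        rw [hf pos hp]; exact List.getD_eq_getElem l '#' hp
      by_cases hc : l[pos] = '#'
      · simp [pvRunLen, hp, hfd, hc, hdrop]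
      · rw [pvRunLen]
        simp only [hp, hfd, hc, ne_eq, not_false_iff, and_true, if_pos]
        rw [ih (pos + 1) (by omega)]
        conv_rhs => rw [hdrop, List.takeWhile_cons]
        simp [hc]
    · have hle : l.length ≤ pos := by omega
      simp [pvRunLen, hp, List.drop_eq_nil_of_le hle]

theorem pvScan_eq (l : List Char) (f : Nat → Char)
    (hf : ∀ p, p < l.length → f p = l.getD p '#') :
    ∀ fuel pos acc, l.length ≤ fuel + pos →
      pvScan f l.length pos fuel acc = acc ++ pvBlocksOff (l.drop pos) pos := by
  intro fuel
  induction fuel with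
  | zero =>
    intro pos acc h
    have hle : l.length ≤ pos := by omega
    simp [pvScan, List.drop_eq_nil_of_le hle, pvBlocksOff]
  | succ fl ih =>
    intro pos acc h
    by_cases hp : pos < l.length
    · have hdrop : l.drop pos = l[pos] :: l.drop (pos + 1) := List.drop_eq_getElem_cons hp
      have hfd : f pos = l[pos] := by
        rw [hf pos hp]; exact List.getD_eq_getElem l '#' hp
      by_cases hc : l[pos] = '#'
      · rw [pvScan]
        simp only [hp, if_true, hfd, hc, ne_eq, not_true_eq_false, if_false]
        rw [ih (pos + 1) acc (by omega)]
        conv_rhs => rw [hdrop, pvBlocksOff]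
        simp [hc]
      · have hk : pvRunLen f l.length pos (l.length - pos)
            = ((l.drop pos).takeWhile (· ≠ '#')).length :=
          pvRunLen_eq l f hf (l.length - pos) pos (by omega)
        set k := ((l.drop pos).takeWhile (· ≠ '#')).length with hkdef
        have hk1 : 1 ≤ k := by
          rw [hkdef, hdrop, List.takeWhile_cons]; simp [hc]
        have hdw : (l.drop pos).dropWhile (· ≠ '#') = l.drop (pos + k) := by
          have h1 : (l.drop pos).takeWhile (· ≠ '#') ++ (l.drop pos).dropWhile (· ≠ '#')
              = l.drop pos := List.takeWhile_append_dropWhile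
          have h2 : l.drop (pos + k) = (l.drop pos).drop k := by
            rw [List.drop_drop]
          rw [h2, ← h1, List.drop_left' hkdef.symm]
          simp
        rw [pvScan]
        simp only [hp, hfd, hc, ne_eq, not_false_eq_true, if_pos, hk]
        rw [ih (pos + k) _ (by omega)]
        conv_rhs => rw [hdrop, pvBlocksOff]
        simp only [hc, if_false, ← hdrop, ← hkdef, hdw]
        split_ifs <;> simp
    · have hle : l.length ≤ pos := by omega
      rw [pvScan]
      simp [hp, List.drop_eq_nil_of_le hle, pvBlocksOff]

theorem pvSplitHash_no_hash (t : List Char) (ht : ∀ c ∈ t, c ≠ '#') :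
    pvSplitHash t = [t] := by
  induction t with
  | nil => rfl
  | cons c r ih =>
    have hc : c ≠ '#' := ht c (by simp)
    rw [pvSplitHash, ih (fun x hx => ht x (by simp [hx]))]
    simp [hc]

theorem pvSplitHash_append (t r : List Char) (ht : ∀ c ∈ t, c ≠ '#') :
    pvSplitHash (t ++ '#' :: r) = t :: pvSplitHash r := by
  induction t with
  | nil => simp [pvSplitHash]
  | cons c s ih =>
    have hc : c ≠ '#' := ht c (by simp)
    rw [List.cons_append, pvSplitHash, ih (fun x hx => ht x (by simp [hx]))]
    simp [hc]

theorem dropWhile_head_false {p : Char → Bool} (l : List Char) (c : Char) (r : List Char)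
    (h : l.dropWhile p = c :: r) : p c = false := by
  induction l with
  | nil => simp [List.dropWhile] at h
  | cons a t ih =>
    rw [List.dropWhile_cons] at h
    by_cases hp : p a = true
    · exact ih (by simpa [hp] using h)
    · simp [hp] at h
      rw [← h.1]
      simpa using hp

theorem pvFold_eq (N : Nat) : ∀ (l : List Char), l.length ≤ N → ∀ (off : Nat) (acc : List (Nat × Nat)),
    ((pvSplitHash l).foldl
      (fun st part =>
        (if 1 < part.length then st.1 ++ [(st.2, part.length)] else st.1,
         st.2 + part.length + 1))
      (acc, off)).1 = acc ++ pvBlocksOff l off := by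
  induction N with
  | zero =>
    intro l hl off acc
    have : l = [] := List.eq_nil_of_length_eq_zero (by omega)
    subst this
    simp [pvSplitHash, pvBlocksOff]
  | succ N ih =>
    intro l hl off acc
    match l with
    | [] => simp [pvSplitHash, pvBlocksOff]
    | c :: rest =>
      by_cases hc : c = '#'
      · subst hc
        have hs : pvSplitHash ('#' :: rest) = [] :: pvSplitHash rest := by
          rw [pvSplitHash]; simp
        rw [hs, List.foldl_cons]
        have h2 := ih rest (by simpa using hl) (off + 1) acc
        conv_rhs => rw [pvBlocksOff]
        simpa using h2
      · set t := (c :: rest).takeWhile (· ≠ '#') with htdef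
        set d := (c :: rest).dropWhile (· ≠ '#') with hddef
        have htd : t ++ d = c :: rest := List.takeWhile_append_dropWhile
        have htmem : ∀ x ∈ t, x ≠ '#' := by
          intro x hx
          have := List.mem_takeWhile_imp hx
          simpa using this
        have hblocks : pvBlocksOff (c :: rest) off =
            (if 1 < t.length then [(off, t.length)] else []) ++ pvBlocksOff d (off + t.length) := by
          rw [pvBlocksOff, if_neg hc]
        have ht1 : 1 ≤ t.length := by
          rw [htdef, List.takeWhile_cons]
          simp [hc]
        match hd : d with
        | [] =>
          have hteq : c :: rest = t := by rw [← htd]; simp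
          have hs2 : pvSplitHash (c :: rest) = [t] := by
            rw [hteq]; exact pvSplitHash_no_hash t htmem
          rw [hs2]
          simp only [List.foldl_cons, List.foldl_nil]
          rw [hblocks]
          simp only [pvBlocksOff, List.append_nil]
          split_ifs <;> simp
        | c' :: r =>
          have hc' : c' = '#' := by
            have := dropWhile_head_false (c :: rest) c' r hddef.symm
            simpa using this
          subst hc'
          have hsplit : pvSplitHash (c :: rest) = t :: pvSplitHash r := by
            rw [← htd]
            exact pvSplitHash_append t r htmem
          have hlen : r.length ≤ N := by
            have h1 := congrArg List.length htd
            simp at h1 hl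
            omega
          rw [hsplit]
          simp only [List.foldl_cons]
          rw [ih r hlen (off + t.length + 1)]
          have h3 : pvBlocksOff ('#' :: r) (off + t.length) = pvBlocksOff r (off + t.length + 1) := by
            rw [pvBlocksOff]; simp
          rw [hblocks, h3]
          split_ifs <;> simp

theorem pvRuns_eq (l : List Char) : pvRuns l = pvBlocksOff l 0 := by
  have := pvFold_eq l.length l (le_refl _) 0 []
  simpa [pvRuns] using this

theorem flatMap_congr_mem {α β : Type} (l : List α) (f g : α → List β)
    (h : ∀ x ∈ l, f x = g x) : l.flatMap f = l.flatMap g := by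
  induction l with
  | nil => rfl
  | cons a t ih =>
    simp only [List.flatMap_cons, h a (by simp), ih (fun x hx => h x (by simp [hx]))]

theorem pvGetD_take_eq (xs : List Char) (n p : Nat) (hp : p < n) (hx : p < xs.length) :
    (xs.take n).getD p '#' = xs.getD p '#' := by
  rw [List.getD_eq_getElem _ _ (by simp; omega), List.getD_eq_getElem _ _ hx]
  exact List.getElem_take

theorem pvRow_eq (tts : List String) (i : Nat)
    (hlen : tts.length ≤ (tts.getD i "").length) :
    pvScan (fun j => pvCell tts i j) tts.length 0 tts.length []
      = pvRuns ((tts.getD i "").toList.take tts.length) := by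
  have hlen' : tts.length ≤ (tts.getD i "").toList.length := by
    have h0 : (tts.getD i "").toList.length = (tts.getD i "").length := by simp
    omega
  set l := (tts.getD i "").toList.take tts.length with hl
  have hll : l.length = tts.length := by
    rw [hl, List.length_take]
    omega
  have hf : ∀ p, p < l.length → pvCell tts i p = l.getD p '#' := by
    intro p hp
    rw [hll] at hp
    unfold pvCell
    rw [hl, pvGetD_take_eq _ _ _ hp (by omega)]
  rw [pvRuns_eq, ← hll]
  have := pvScan_eq l (fun j => pvCell tts i j) hf l.length 0 [] (by omega)
  simpa using this

theorem pvCol_eq (tts : List String) (j : Nat) :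
    pvScan (fun i => pvCell tts i j) tts.length 0 tts.length []
      = pvRuns ((List.range tts.length).map (fun i => pvCell tts i j)) := by
  set l := (List.range tts.length).map (fun i => pvCell tts i j) with hl
  have hll : l.length = tts.length := by simp [hl]
  have hf : ∀ p, p < l.length → pvCell tts p j = l.getD p '#' := by
    intro p hp
    rw [List.getD_eq_getElem _ _ hp]
    rw [hll] at hp
    simp [hl]
  rw [pvRuns_eq, ← hll]
  have := pvScan_eq l (fun i => pvCell tts i j) hf l.length 0 [] (by omega)
  simpa using this

-- ===== VERDICT (by name: the statement is the Claim_ definition above) =====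
theorem get_all_block_spec : Claim_equal_get_all_block := by
  intro tts _ hpre
  unfold Spec_get_all_block get_all_block get_all_block_alt
  rw [PySem.List.foldl_append_eq_flatMap, PySem.List.foldl_append_eq_flatMap, List.nil_append]
  congr 1
  · apply flatMap_congr_mem
    intro i hi
    have hi' : i < tts.length := List.mem_range.mp hi
    have hmem : tts.getD i "" ∈ tts := by
      rw [List.getD_eq_getElem _ _ hi']
      exact List.getElem_mem hi'
    rw [pvRow_eq tts i (hpre _ hmem)]
  · apply flatMap_congr_mem
    intro j hj
    rw [pvCol_eq tts j]
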